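-- pv_equiv track=rewrite | github.com/xfactlab/xfact-nlp | src/deardr/inference/scoring.py | lrp
-- ===== SOURCE A (Python) =====
-- def lrp(actual, predicted):
--     actual = list(actual)
--     predicted = list(predicted)
--     rank = 1
--     denom = 1
--     found = False
--     if len(predicted) and len(actual):
--         for p in reversed(predicted):
--             if p in actual and not found:
--                 found = True
--             elif p not in actual and found:
--                 rank += 1
--             elif p not in actual:
--                 denom += 1
--     return found, rank, denom
-- ===== SOURCE B (Python) =====
-- def lrp(actual, predicted):
--     actual = list(actual)
--     predicted = list(predicted)
--     if not (len(predicted) and len(actual)):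
--         return False, 1, 1
--     last = None
--     for i in range(len(predicted) - 1, -1, -1):
--         if predicted[i] in actual:
--             last = i
--             break
--     if last is None:
--         return False, 1, 1 + sum(1 for p in predicted if p not in actual)
--     rank = 1 + sum(1 for p in predicted[:last] if p not in actual)
--     denom = 1 + sum(1 for p in predicted[last + 1:] if p not in actual)
--     return True, rank, denom
-- ===== Notes on version B (the rewrite author's own statement) =====
-- stated objective: alternative
-- what changed: A's single stateful pass over reversed(predicted) with found/rank/denom mode switching is replaced by an early-break scan from the end locating the last index whose element is in actual, followed by two independent miss-counts over the slices before and after that index.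
import Mathlib
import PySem

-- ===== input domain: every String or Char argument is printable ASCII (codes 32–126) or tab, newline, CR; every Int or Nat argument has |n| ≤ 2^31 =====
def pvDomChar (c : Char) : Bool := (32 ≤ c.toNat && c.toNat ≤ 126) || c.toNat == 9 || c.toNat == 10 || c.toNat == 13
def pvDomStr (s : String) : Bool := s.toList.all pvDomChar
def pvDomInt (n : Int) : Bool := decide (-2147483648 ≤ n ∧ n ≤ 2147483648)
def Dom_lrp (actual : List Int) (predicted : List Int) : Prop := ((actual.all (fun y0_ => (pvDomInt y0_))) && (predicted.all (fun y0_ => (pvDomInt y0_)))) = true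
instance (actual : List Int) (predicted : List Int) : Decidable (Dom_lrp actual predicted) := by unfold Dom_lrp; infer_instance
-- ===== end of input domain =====

-- B replaces A's single stateful reverse loop by: locate the last matching index with an
-- early-break scan from the end, then count the misses of the two surrounding slices (alternative decomposition, same cost).

-- ===== PORT A =====
-- one loop step: the body of A's `for p in reversed(predicted)`, branches in source order
def lrpStepA (actual : List Int) (st : Bool × Int × Int) (p : Int) : Bool × Int × Int :=
  let (found, rank, denom) := st
  if actual.contains p && !found then (true, rank, denom)
  else if !(actual.contains p) && found then (found, rank + 1, denom)
  else if !(actual.contains p) then (found, rank, denom + 1)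
  else (found, rank, denom)

def lrp (actual : List Int) (predicted : List Int) : Bool × Int × Int :=
  if predicted.length ≠ 0 ∧ actual.length ≠ 0 then
    predicted.reverse.foldl (lrpStepA actual) (false, 1, 1)
  else (false, 1, 1)

-- ===== PORT B =====
-- number of elements of xs not in actual (Source B's `sum(1 for p in xs if p not in actual)`)
def lrpMiss (actual : List Int) (xs : List Int) : Int :=
  ((xs.countP (fun p => !(actual.contains p)) : Nat) : Int)

-- Source B's descending-index search loop with break: walk reversed(predicted) carrying index i
def lrpFindLast (actual : List Int) : List Int → Int → Option Int
  | [], _ => none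
  | p :: rest, i => if actual.contains p then some i else lrpFindLast actual rest (i - 1)

def lrp_alt (actual : List Int) (predicted : List Int) : Bool × Int × Int :=
  if predicted.length ≠ 0 ∧ actual.length ≠ 0 then
    match lrpFindLast actual predicted.reverse ((predicted.length : Int) - 1) with
    | none => (false, 1, 1 + lrpMiss actual predicted)
    | some last =>
        (true, 1 + lrpMiss actual (PySem.List.slice predicted (some 0) (some last)),
               1 + lrpMiss actual (PySem.List.slice predicted (some (last + 1)) none))
  else (false, 1, 1)

-- ===== PRECONDITION & SPEC =====
def Spec_lrp (actual : List Int) (predicted : List Int) (out : Bool × Int × Int) : Prop := out = lrp_alt actual predicted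
instance (actual : List Int) (predicted : List Int) (out : Bool × Int × Int) : Decidable (Spec_lrp actual predicted out) := by unfold Spec_lrp; infer_instance

-- ===== CLAIM (what is proved, stated in full; the proofs are below) =====
def Claim_equal_lrp : Prop := ∀ (actual : List Int) (predicted : List Int), Dom_lrp actual predicted → Spec_lrp actual predicted (lrp actual predicted)

-- ===== LEMMAS AND PROOFS =====

-- once found, every further miss bumps rank and nothing else changes
theorem lrp_foldA_found (actual : List Int) (t : List Int) (r d : Int) :
    t.foldl (lrpStepA actual) (true, r, d) = (true, r + lrpMiss actual t, d) := by
  induction t generalizing r with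
  | nil => simp [lrpMiss]
  | cons p t ih =>
      by_cases h : p ∈ actual
      · simp [List.foldl, lrpStepA, h, ih, lrpMiss]
      · simp [List.foldl, lrpStepA, h, ih, lrpMiss]
        ring

theorem lrp_find_bounds (actual : List Int) (rs : List Int) (i j : Int)
    (h : lrpFindLast actual rs i = some j) : i - (rs.length : Int) < j ∧ j ≤ i := by
  induction rs generalizing i with
  | nil => simp [lrpFindLast] at h
  | cons p t ih =>
      simp only [lrpFindLast] at h
      split at h
      · cases h
        refine ⟨?_, le_rfl⟩
        simp only [List.length_cons]
        push_cast
        omega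
      · have := ih (i - 1) h
        simp only [List.length_cons] at this ⊢
        push_cast at this ⊢
        omega

-- characterisation of A's fold (state not yet found) by B's find-then-count decomposition
theorem lrp_fold_char (actual : List Int) (rs : List Int) (i d : Int) :
    rs.foldl (lrpStepA actual) (false, 1, d) =
      match lrpFindLast actual rs i with
      | none => (false, 1, d + lrpMiss actual rs)
      | some j => (true, 1 + lrpMiss actual (rs.drop ((i - j).toNat + 1)),
                         d + lrpMiss actual (rs.take ((i - j).toNat))) := by
  induction rs generalizing i d with
  | nil => simp [lrpFindLast, lrpMiss]
  | cons p t ih =>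
      by_cases h : p ∈ actual
      · simp [List.foldl, lrpStepA, h, lrpFindLast, lrp_foldA_found, lrpMiss]
      · have step : (p :: t).foldl (lrpStepA actual) (false, 1, d)
            = t.foldl (lrpStepA actual) (false, 1, d + 1) := by
          simp [List.foldl, lrpStepA, h]
        have hL : lrpFindLast actual (p :: t) i = lrpFindLast actual t (i - 1) := by
          simp [lrpFindLast, h]
        rw [step, ih (i - 1) (d + 1), hL]
        cases hf : lrpFindLast actual t (i - 1) with
        | none =>
            simp only [lrpMiss, List.countP_cons]
            rw [if_pos (by simp [h])]
            push_cast
            ring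
        | some j =>
            have hb := lrp_find_bounds actual t (i - 1) j hf
            have e1 : (i - j).toNat = (i - 1 - j).toNat + 1 := by omega
            simp only [lrpMiss]
            rw [e1]
            simp only [List.drop_succ_cons, List.take_succ_cons, List.countP_cons]
            rw [if_pos (by simp [h])]
            push_cast
            ring_nf

-- ===== VERDICT (by name: the statement is the Claim_ definition above) =====
theorem lrp_spec : Claim_equal_lrp := by
  intro actual predicted _
  unfold Spec_lrp lrp lrp_alt
  by_cases hg : predicted.length ≠ 0 ∧ actual.length ≠ 0
  · simp only [if_pos hg]
    rw [lrp_fold_char actual predicted.reverse ((predicted.length : Int) - 1) 1]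
    cases hf : lrpFindLast actual predicted.reverse ((predicted.length : Int) - 1) with
    | none => simp [lrpMiss, List.countP_reverse]
    | some j =>
        have hb := lrp_find_bounds actual predicted.reverse ((predicted.length : Int) - 1) j hf
        simp only [List.length_reverse] at hb
        have hj0 : 0 ≤ j := by omega
        have hlen : j.toNat < predicted.length := by omega
        have s1 : PySem.List.slice predicted (some 0) (some j) = predicted.take j.toNat := by
          rw [PySem.List.slice_zero_start, PySem.List.slice_to predicted hj0]
        have s2 : PySem.List.slice predicted (some (j + 1)) none = predicted.drop (j + 1).toNat := by
          rw [PySem.List.slice_from predicted (by omega : (0:Int) ≤ j + 1)]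
        have e2 : (j + 1).toNat = j.toNat + 1 := by omega
        have edrop : predicted.reverse.drop ((((predicted.length : Int)) - 1 - j).toNat + 1)
            = (predicted.take j.toNat).reverse := by
          rw [List.drop_reverse]
          have : predicted.length - ((((predicted.length : Int)) - 1 - j).toNat + 1) = j.toNat := by
            omega
          rw [this]
        have etake : predicted.reverse.take ((((predicted.length : Int)) - 1 - j).toNat)
            = (predicted.drop (j.toNat + 1)).reverse := by
          rw [List.take_reverse]
          have : predicted.length - (((predicted.length : Int)) - 1 - j).toNat = j.toNat + 1 := by
            omega
          rw [this]
        simp only [s1, s2, e2, edrop, etake, lrpMiss, List.countP_reverse]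
  · simp only [if_neg hg]
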